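-- pv_equiv track=rewrite | github.com/keizman/only-test | only_test/lib/mcp_interface/device_inspector.py | _analyze_features
-- ===== SOURCE A (Python) =====
-- from typing import Dict, List, Any, Optional, Iterable, Tuple
--
-- def _analyze_features(elements: List[Dict[str, Any]]) -> Dict[str, Any]:
--     """分析可用功能"""
--     features = {
--         "search_available": False,
--         "login_available": False,
--         "media_controls": False,
--         "navigation_available": False
--     }
--
--     for element in elements:
--         text = element.get("text", "").lower()
--         resource_id = element.get("resource_id", "").lower()
--
--         if "search" in text or "search" in resource_id:
--             features["search_available"] = True
--         if "login" in text or "sign" in text: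
--             features["login_available"] = True
--         if "play" in text or "pause" in text:
--             features["media_controls"] = True
--         if "back" in text or "menu" in text or "home" in text:
--             features["navigation_available"] = True
--
--     return features
-- ===== SOURCE B (Python) =====
-- def _analyze_features(elements):
--     """分析可用功能"""
--     pairs = [(e.get("text", "").lower(), e.get("resource_id", "").lower())
--              for e in elements]
--     return {
--         "search_available": any("search" in t or "search" in r for t, r in pairs),
--         "login_available": any("login" in t or "sign" in t for t, _ in pairs),
--         "media_controls": any("play" in t or "pause" in t for t, _ in pairs),
--         "navigation_available": any("back" in t or "menu" in t or "home" in t for t, _ in pairs),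
--     }
-- ===== Notes on version B (the rewrite author's own statement) =====
-- stated objective: idiomatic
-- what changed: Replaces the single accumulating loop over a mutable flag dict by one pass building lowered (text, resource_id) pairs plus four independent short-circuiting any() scans, assembled directly into the result dict.
import Mathlib
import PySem

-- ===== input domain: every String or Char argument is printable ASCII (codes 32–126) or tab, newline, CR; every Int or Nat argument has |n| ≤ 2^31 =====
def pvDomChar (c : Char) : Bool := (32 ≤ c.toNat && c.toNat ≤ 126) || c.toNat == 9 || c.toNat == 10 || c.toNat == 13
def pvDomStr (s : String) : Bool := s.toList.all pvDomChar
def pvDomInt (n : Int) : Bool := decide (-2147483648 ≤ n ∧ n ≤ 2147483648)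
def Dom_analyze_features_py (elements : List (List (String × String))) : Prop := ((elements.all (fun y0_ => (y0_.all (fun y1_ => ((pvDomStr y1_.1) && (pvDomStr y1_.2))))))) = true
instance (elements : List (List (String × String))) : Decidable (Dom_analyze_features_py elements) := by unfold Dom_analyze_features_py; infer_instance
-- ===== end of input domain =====

-- B replaces A's single accumulating loop over a mutable flag dict by a pairs table plus
-- four independent any-scans (objective: more idiomatic decomposition; same O(n) cost).

-- ===== PORT A =====
def analyze_features_py (elements : List (List (String × String))) : List (String × Bool) :=
  let features : PySem.Dict String Bool := PySem.Dict.mk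
    [("search_available", false), ("login_available", false),
     ("media_controls", false), ("navigation_available", false)]
  let features := elements.foldl (fun features element =>
    let text := PySem.Str.lower (PySem.Dict.getD (PySem.Dict.mk element) "text" "")
    let resource_id := PySem.Str.lower (PySem.Dict.getD (PySem.Dict.mk element) "resource_id" "")
    let features := if PySem.Str.isIn "search" text || PySem.Str.isIn "search" resource_id then
        features.insert "search_available" true else features
    let features := if PySem.Str.isIn "login" text || PySem.Str.isIn "sign" text then
        features.insert "login_available" true else features
    let features := if PySem.Str.isIn "play" text || PySem.Str.isIn "pause" text then
        features.insert "media_controls" true else features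
    let features := if PySem.Str.isIn "back" text || PySem.Str.isIn "menu" text || PySem.Str.isIn "home" text then
        features.insert "navigation_available" true else features
    features) features
  features.items

-- ===== PORT B =====
def analyze_features_py_alt (elements : List (List (String × String))) : List (String × Bool) :=
  let pairs := elements.map (fun e =>
    (PySem.Str.lower (PySem.Dict.getD (PySem.Dict.mk e) "text" ""),
     PySem.Str.lower (PySem.Dict.getD (PySem.Dict.mk e) "resource_id" "")))
  [("search_available", pairs.any (fun p => PySem.Str.isIn "search" p.1 || PySem.Str.isIn "search" p.2)),
   ("login_available", pairs.any (fun p => PySem.Str.isIn "login" p.1 || PySem.Str.isIn "sign" p.1)),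
   ("media_controls", pairs.any (fun p => PySem.Str.isIn "play" p.1 || PySem.Str.isIn "pause" p.1)),
   ("navigation_available", pairs.any (fun p => PySem.Str.isIn "back" p.1 || PySem.Str.isIn "menu" p.1 || PySem.Str.isIn "home" p.1))]

-- ===== PRECONDITION & SPEC =====
def Spec_analyze_features_py (elements : List (List (String × String))) (out : List (String × Bool)) : Prop := out = analyze_features_py_alt elements
instance (elements : List (List (String × String))) (out : List (String × Bool)) : Decidable (Spec_analyze_features_py elements out) := by unfold Spec_analyze_features_py; infer_instance

-- ===== CLAIM (what is proved, stated in full; the proofs are below) =====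
def Claim_equal_analyze_features_py : Prop := ∀ (elements : List (List (String × String))), Dom_analyze_features_py elements → Spec_analyze_features_py elements (analyze_features_py elements)

-- ===== LEMMAS AND PROOFS =====

-- the lowered (text, resource_id) pair of one element
def pvPair (e : List (String × String)) : String × String :=
  (PySem.Str.lower (PySem.Dict.getD (PySem.Dict.mk e) "text" ""),
   PySem.Str.lower (PySem.Dict.getD (PySem.Dict.mk e) "resource_id" ""))

def pvC1 (p : String × String) : Bool := PySem.Str.isIn "search" p.1 || PySem.Str.isIn "search" p.2
def pvC2 (p : String × String) : Bool := PySem.Str.isIn "login" p.1 || PySem.Str.isIn "sign" p.1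
def pvC3 (p : String × String) : Bool := PySem.Str.isIn "play" p.1 || PySem.Str.isIn "pause" p.1
def pvC4 (p : String × String) : Bool := PySem.Str.isIn "back" p.1 || PySem.Str.isIn "menu" p.1 || PySem.Str.isIn "home" p.1

-- A's loop body on the literal four-key dict
def pvStep (d : PySem.Dict String Bool) (element : List (String × String)) : PySem.Dict String Bool :=
  let text := PySem.Str.lower (PySem.Dict.getD (PySem.Dict.mk element) "text" "")
  let resource_id := PySem.Str.lower (PySem.Dict.getD (PySem.Dict.mk element) "resource_id" "")
  let d := if PySem.Str.isIn "search" text || PySem.Str.isIn "search" resource_id then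
      d.insert "search_available" true else d
  let d := if PySem.Str.isIn "login" text || PySem.Str.isIn "sign" text then
      d.insert "login_available" true else d
  let d := if PySem.Str.isIn "play" text || PySem.Str.isIn "pause" text then
      d.insert "media_controls" true else d
  let d := if PySem.Str.isIn "back" text || PySem.Str.isIn "menu" text || PySem.Str.isIn "home" text then
      d.insert "navigation_available" true else d
  d

def pvDict4 (b1 b2 b3 b4 : Bool) : PySem.Dict String Bool :=
  PySem.Dict.mk
    [("search_available", b1), ("login_available", b2),
     ("media_controls", b3), ("navigation_available", b4)]

lemma pvStep_dict4 (b1 b2 b3 b4 : Bool) (e : List (String × String)) :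
    pvStep (pvDict4 b1 b2 b3 b4) e =
      pvDict4 (b1 || pvC1 (pvPair e)) (b2 || pvC2 (pvPair e))
              (b3 || pvC3 (pvPair e)) (b4 || pvC4 (pvPair e)) := by
  simp only [pvStep, pvC1, pvC2, pvC3, pvC4, pvPair, pvDict4]
  split_ifs with h1 h2 h3 h4 <;>
    simp_all [PySem.Dict.insert, PySem.Dict.contains, List.any]

lemma pvFoldl_dict4 (es : List (List (String × String))) (b1 b2 b3 b4 : Bool) :
    es.foldl pvStep (pvDict4 b1 b2 b3 b4) =
      pvDict4 (b1 || (es.map pvPair).any pvC1) (b2 || (es.map pvPair).any pvC2)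
              (b3 || (es.map pvPair).any pvC3) (b4 || (es.map pvPair).any pvC4) := by
  induction es generalizing b1 b2 b3 b4 with
  | nil => simp
  | cons e es ih =>
      simp [List.foldl_cons, pvStep_dict4, ih, Bool.or_assoc]

-- ===== VERDICT (by name: the statement is the Claim_ definition above) =====
theorem analyze_features_py_spec : Claim_equal_analyze_features_py := by
  intro elements _
  show analyze_features_py elements = analyze_features_py_alt elements
  have h : analyze_features_py elements =
      (elements.foldl pvStep (pvDict4 false false false false)).items := rfl
  rw [h, pvFoldl_dict4]
  simp only [pvDict4, analyze_features_py_alt, List.any_map, Bool.false_or]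
  rfl
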